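-- pv_equiv track=rewrite | github.com/BenCarlson01/GCJSolutions | 2018/problem1.py | calc_damage
-- ===== SOURCE A (Python) =====
-- def calc_damage(commands):
--   dam = 1
--   tot = 0
--   for i in commands:
--     if i == "S":
--       tot += dam
--     else:
--       dam *= 2
--   return tot
-- ===== SOURCE B (Python) =====
-- def calc_damage(commands):
--     # Right-to-left: a charge command doubles the damage of every shot after it,
--     # and each shot contributes 1 (relative to the charges preceding it).
--     tot = 0
--     for c in reversed(commands):
--         tot = tot + 1 if c == "S" else tot * 2
--     return tot
-- ===== Notes on version B (the rewrite author's own statement) =====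
-- stated objective: alternative
-- what changed: B scans the command string in reverse with a single accumulator (tot+1 on a shot, tot*2 on a charge), eliminating A's explicit power-of-two damage variable; correct because each charge doubles the damage of every later shot.
import Mathlib
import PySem

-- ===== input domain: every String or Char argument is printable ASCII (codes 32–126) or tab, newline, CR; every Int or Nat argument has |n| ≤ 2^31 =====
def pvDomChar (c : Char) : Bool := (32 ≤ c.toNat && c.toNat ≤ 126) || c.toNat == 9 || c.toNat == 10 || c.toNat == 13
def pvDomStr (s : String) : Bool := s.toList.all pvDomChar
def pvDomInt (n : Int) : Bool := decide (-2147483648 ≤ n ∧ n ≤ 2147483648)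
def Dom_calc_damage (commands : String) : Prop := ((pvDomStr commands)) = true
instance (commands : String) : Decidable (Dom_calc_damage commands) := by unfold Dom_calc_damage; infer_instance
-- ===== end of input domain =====

-- B scans the string in reverse with one accumulator (tot+1 on 'S', tot*2 otherwise),
-- eliminating A's power-of-two damage variable (objective: alternative); returns are equal.

-- ===== PORT A =====
-- A's loop: state (dam, tot); 'S' adds dam to tot, anything else doubles dam.
def calcDamageLoopA : List Char → Int → Int → Int
  | [], _, tot => tot
  | c :: cs, dam, tot =>
      if c = 'S' then calcDamageLoopA cs dam (tot + dam)
      else calcDamageLoopA cs (dam * 2) tot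

def calc_damage (commands : String) : Int :=
  calcDamageLoopA commands.toList 1 0

-- ===== PORT B =====
-- B's loop over reversed(commands): tot + 1 on a shot, tot * 2 on a charge.
def calc_damage_alt (commands : String) : Int :=
  commands.toList.reverse.foldl (fun tot c => if c = 'S' then tot + 1 else tot * 2) 0

-- ===== PRECONDITION & SPEC =====
def Spec_calc_damage (commands : String) (out : Int) : Prop := out = calc_damage_alt commands
instance (commands : String) (out : Int) : Decidable (Spec_calc_damage commands out) := by unfold Spec_calc_damage; infer_instance

-- ===== CLAIM (what is proved, stated in full; the proofs are below) =====
def Claim_equal_calc_damage : Prop := ∀ (commands : String), Dom_calc_damage commands → Spec_calc_damage commands (calc_damage commands)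

-- ===== LEMMAS AND PROOFS =====

-- A's loop equals tot + dam * (the right fold B's reverse-foldl computes).
theorem calcDamageLoopA_eq_foldr (cs : List Char) :
    ∀ dam tot : Int,
      calcDamageLoopA cs dam tot
        = tot + dam * cs.foldr (fun c acc => if c = 'S' then acc + 1 else acc * 2) 0 := by
  induction cs with
  | nil => intro dam tot; simp [calcDamageLoopA]
  | cons c cs ih =>
      intro dam tot
      by_cases h : c = 'S' <;> simp [calcDamageLoopA, h]
      · rw [ih]; ring
      · rw [ih]; ring

-- ===== VERDICT (by name: the statement is the Claim_ definition above) =====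
theorem calc_damage_spec : Claim_equal_calc_damage := by
  intro commands _
  unfold Spec_calc_damage calc_damage calc_damage_alt
  rw [List.foldl_reverse, calcDamageLoopA_eq_foldr]
  simp
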